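-- pv_equiv track=rewrite | github.com/PaulMeinheit/Bachelor_Muay_Thai | michaelLABtoCOMChanger.py | group_by_trials
-- ===== SOURCE A (Python) =====
-- from typing import List, Dict
--
-- def group_by_trials(ang_blocks: List[dict]):
--     groups, cur = [], []
--     for b in ang_blocks:
--         cur.append(b)
--         if b["name"] == "FullBody_AngMom":
--             groups.append(cur)
--             cur = []
--     if cur:
--         groups.append(cur)
--     return groups
-- ===== SOURCE B (Python) =====
-- from typing import List, Dict
--
-- def group_by_trials(ang_blocks: List[dict]):
--     marks = [i for i, b in enumerate(ang_blocks) if b["name"] == "FullBody_AngMom"]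
--     groups = []
--     start = 0
--     for i in marks:
--         groups.append(ang_blocks[start:i + 1])
--         start = i + 1
--     if start < len(ang_blocks):
--         groups.append(ang_blocks[start:])
--     return groups
-- ===== Notes on version B (the rewrite author's own statement) =====
-- stated objective: alternative
-- what changed: B first collects the indices of all marker blocks and then emits each group as a slice between consecutive cut points (plus the leftover tail slice), instead of A's single pass that mutates a current-group accumulator and flushes it at each marker.
import Mathlib
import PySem

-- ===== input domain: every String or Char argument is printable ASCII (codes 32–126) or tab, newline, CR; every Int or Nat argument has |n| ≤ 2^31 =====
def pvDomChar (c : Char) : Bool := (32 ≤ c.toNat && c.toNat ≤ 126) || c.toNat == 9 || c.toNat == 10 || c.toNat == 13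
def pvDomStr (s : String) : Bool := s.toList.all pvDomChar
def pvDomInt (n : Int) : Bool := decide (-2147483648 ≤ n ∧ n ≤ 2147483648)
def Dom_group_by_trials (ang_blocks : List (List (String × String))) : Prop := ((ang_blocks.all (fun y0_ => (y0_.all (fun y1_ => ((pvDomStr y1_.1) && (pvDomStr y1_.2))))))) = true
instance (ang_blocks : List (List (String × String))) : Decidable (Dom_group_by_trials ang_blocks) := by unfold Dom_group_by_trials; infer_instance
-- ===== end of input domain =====

-- B groups the blocks by slicing at precomputed marker indices instead of A's running accumulator;
-- same asymptotic cost, different decomposition.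

-- b["name"]: first match in the association list (Python dict lookup; KeyError = none, excluded by Pre_)
def pyGetName (b : List (String × String)) : Option String :=
  (b.find? (fun p => p.1 == "name")).map (·.2)

-- ===== PORT A =====
def stepA (st : List (List (List (String × String))) × List (List (String × String)))
    (b : List (String × String)) : List (List (List (String × String))) × List (List (String × String)) :=
  let cur := st.2 ++ [b]
  if pyGetName b == some "FullBody_AngMom" then (st.1 ++ [cur], []) else (st.1, cur)

def group_by_trials (ang_blocks : List (List (String × String))) : List (List (List (String × String))) :=
  let st := ang_blocks.foldl stepA ([], [])
  if st.2.isEmpty then st.1 else st.1 ++ [st.2]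

-- ===== PORT B =====
def marksOf (ang_blocks : List (List (String × String))) : List Int :=
  ((PySem.List.enumerate ang_blocks 0).filter (fun p => pyGetName p.2 == some "FullBody_AngMom")).map (·.1)

def stepB (ang_blocks : List (List (String × String)))
    (st : List (List (List (String × String))) × Int) (i : Int) :
    List (List (List (String × String))) × Int :=
  (st.1 ++ [PySem.List.slice ang_blocks (some st.2) (some (i + 1))], i + 1)

def group_by_trials_alt (ang_blocks : List (List (String × String))) : List (List (List (String × String))) :=
  let st := (marksOf ang_blocks).foldl (stepB ang_blocks) ([], 0)
  if st.2 < (ang_blocks.length : Int) then st.1 ++ [PySem.List.slice ang_blocks (some st.2) none] else st.1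

-- ===== PRECONDITION & SPEC =====
-- Pre_ excludes inputs containing a block with no "name" key: there Python A (and B) raise KeyError.
def Pre_group_by_trials (ang_blocks : List (List (String × String))) : Prop :=
  (ang_blocks.all (fun b => b.any (fun p => p.1 == "name"))) = true
instance (ang_blocks : List (List (String × String))) : Decidable (Pre_group_by_trials ang_blocks) := by
  unfold Pre_group_by_trials; infer_instance

def pvWitness_group_by_trials : (List (List (String × String))) :=
  [[("name", "FullBody_AngMom")], [("name", "hip")], [("name", "FullBody_AngMom")], [("name", "knee")]]

def Spec_group_by_trials (ang_blocks : List (List (String × String))) (out : List (List (List (String × String)))) : Prop := out = group_by_trials_alt ang_blocks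
instance (ang_blocks : List (List (String × String))) (out : List (List (List (String × String)))) : Decidable (Spec_group_by_trials ang_blocks out) := by unfold Spec_group_by_trials; infer_instance

-- ===== CLAIM (what is proved, stated in full; the proofs are below) =====
def Claim_equal_group_by_trials : Prop := ∀ (ang_blocks : List (List (String × String))), Dom_group_by_trials ang_blocks → Pre_group_by_trials ang_blocks → Spec_group_by_trials ang_blocks (group_by_trials ang_blocks)

-- ===== LEMMAS AND PROOFS =====

-- reference grouping, used only by the proofs
def pvGroups : List (List (String × String)) → List (List (List (String × String)))
  | [] => []
  | b :: xs =>
    if pyGetName b == some "FullBody_AngMom" then [b] :: pvGroups xs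
    else match pvGroups xs with
      | [] => [[b]]
      | g :: gs => (b :: g) :: gs

def pvPrepTo (cur : List (List (String × String))) :
    List (List (List (String × String))) → List (List (List (String × String)))
  | [] => if cur.isEmpty then [] else [cur]
  | g :: gs => (cur ++ g) :: gs

lemma pvPrepTo_nil (l : List (List (List (String × String)))) : pvPrepTo [] l = l := by
  cases l <;> simp [pvPrepTo]

lemma A_main (xs : List (List (String × String)))
    (gs : List (List (List (String × String)))) (cur : List (List (String × String))) :
    (let st := xs.foldl stepA (gs, cur); if st.2.isEmpty then st.1 else st.1 ++ [st.2]) =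
      gs ++ pvPrepTo cur (pvGroups xs) := by
  induction xs generalizing gs cur with
  | nil =>
    simp only [List.foldl_nil, pvGroups, pvPrepTo]
    cases cur <;> simp
  | cons b xs ih =>
    simp only [List.foldl_cons, stepA, pvGroups]
    by_cases hb : pyGetName b == some "FullBody_AngMom"
    · rw [if_pos hb, if_pos hb, ih, pvPrepTo_nil]
      simp [pvPrepTo, List.append_assoc]
    · rw [if_neg hb, if_neg hb, ih]
      cases h : pvGroups xs <;> simp [pvPrepTo, List.append_assoc]

lemma A_eq_pvGroups (xs : List (List (String × String))) :
    group_by_trials xs = pvGroups xs := by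
  have := A_main xs [] []
  simpa [group_by_trials, pvPrepTo_nil] using this

-- shifting the start index of enumerate
lemma enumerate_shift {α : Type} (xs : List α) (s : Int) :
    PySem.List.enumerate xs (s + 1) = (PySem.List.enumerate xs s).map (fun p => (p.1 + 1, p.2)) := by
  induction xs generalizing s with
  | nil => simp [PySem.List.enumerate_nil]
  | cons x xs ih => simp [PySem.List.enumerate_cons, ih]

lemma marksOf_cons (b : List (String × String)) (xs : List (List (String × String))) :
    marksOf (b :: xs) =
      (if pyGetName b == some "FullBody_AngMom" then [(0 : Int)] else []) ++ (marksOf xs).map (· + 1) := by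
  simp only [marksOf, PySem.List.enumerate_cons, enumerate_shift]
  by_cases hb : pyGetName b == some "FullBody_AngMom" <;>
    simp [hb, List.filter_map, Function.comp_def]

lemma marksOf_nonneg (xs : List (List (String × String))) :
    ∀ i ∈ marksOf xs, 0 ≤ i := by
  intro i hi
  simp only [marksOf, List.mem_map, List.mem_filter] at hi
  obtain ⟨p, ⟨hp, _⟩, rfl⟩ := hi
  rw [PySem.List.mem_enumerate_iff] at hp
  obtain ⟨k, _, rfl⟩ := hp
  simp

-- the accumulated groups factor out of the fold
lemma B_acc (xs : List (List (String × String))) (ms : List Int)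
    (gs : List (List (List (String × String)))) (s : Int) :
    ms.foldl (stepB xs) (gs, s) =
      (gs ++ (ms.foldl (stepB xs) ([], s)).1, (ms.foldl (stepB xs) ([], s)).2) := by
  induction ms generalizing gs s with
  | nil => simp
  | cons i ms ih =>
    simp only [List.foldl_cons, stepB, List.nil_append]
    rw [ih, ih [PySem.List.slice xs (some s) (some (i + 1))]]
    simp [List.append_assoc]

-- the fold's running cut point stays nonnegative
lemma B_snd_nonneg (xs : List (List (String × String))) (ms : List Int)
    (hm : ∀ i ∈ ms, 0 ≤ i) (s : Int) (hs : 0 ≤ s) :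
    0 ≤ (ms.foldl (stepB xs) ([], s)).2 := by
  induction ms generalizing s with
  | nil => simpa
  | cons i ms ih =>
    simp only [List.foldl_cons, stepB, List.nil_append]
    rw [B_acc]
    exact ih (fun j hj => hm j (List.mem_cons_of_mem _ hj)) (i + 1)
      (by have := hm i (List.mem_cons_self ..); omega)

lemma slice_shift (b : List (String × String)) (xs : List (List (String × String)))
    (a c : Int) (ha : 0 ≤ a) (hc : 0 ≤ c) :
    PySem.List.slice (b :: xs) (some (a + 1)) (some (c + 1)) = PySem.List.slice xs (some a) (some c) := by
  rw [PySem.List.slice_toNat _ (by omega) (by omega), PySem.List.slice_toNat _ ha hc]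
  have h1 : (a + 1).toNat = a.toNat + 1 := by omega
  have h2 : (c + 1).toNat = c.toNat + 1 := by omega
  simp [h1, h2]

-- shifting the whole fold by one position past a cons cell
lemma B_shift (b : List (String × String)) (xs : List (List (String × String)))
    (ms : List Int) (hm : ∀ i ∈ ms, 0 ≤ i) (s : Int) (hs : 0 ≤ s) :
    (ms.map (· + 1)).foldl (stepB (b :: xs)) ([], s + 1) =
      ((ms.foldl (stepB xs) ([], s)).1, (ms.foldl (stepB xs) ([], s)).2 + 1) := by
  induction ms generalizing s with
  | nil => simp
  | cons i ms ih =>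
    have hi : 0 ≤ i := hm i (List.mem_cons_self ..)
    have hm' : ∀ j ∈ ms, 0 ≤ j := fun j hj => hm j (List.mem_cons_of_mem _ hj)
    simp only [List.map_cons, List.foldl_cons, stepB, List.nil_append]
    rw [slice_shift b xs s (i + 1) hs (by omega)]
    rw [B_acc (b :: xs), B_acc xs, ih hm' (i + 1) (by omega)]

lemma B_eq_pvGroups (xs : List (List (String × String))) :
    group_by_trials_alt xs = pvGroups xs := by
  induction xs with
  | nil => simp [group_by_trials_alt, marksOf, pvGroups]
  | cons b xs ih =>
    have hnn := marksOf_nonneg xs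
    by_cases hb : pyGetName b == some "FullBody_AngMom"
    · -- head is a marker: B (b :: xs) = [b] :: B xs
      have hm : marksOf (b :: xs) = 0 :: (marksOf xs).map (· + 1) := by
        rw [marksOf_cons, if_pos hb]; rfl
      have h1 : PySem.List.slice (b :: xs) (some (0 : Int)) (some ((0 : Int) + 1)) = [b] := by
        rw [PySem.List.slice_toNat _ (by omega) (by omega)]; rfl
      simp only [group_by_trials_alt, hm, List.foldl_cons, stepB, List.nil_append, h1]
      rw [B_acc (b :: xs), B_shift b xs (marksOf xs) hnn 0 le_rfl]
      set F := (marksOf xs).foldl (stepB xs) ([], 0) with hF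
      have hF2 : 0 ≤ F.2 := B_snd_nonneg xs (marksOf xs) hnn 0 le_rfl
      have hcond : (F.2 + 1 < ((b :: xs).length : Int)) ↔ (F.2 < (xs.length : Int)) := by
        simp only [List.length_cons]; push_cast; omega
      have htail : PySem.List.slice (b :: xs) (some (F.2 + 1)) = PySem.List.slice xs (some F.2) := by
        rw [PySem.List.slice_from _ (by omega), PySem.List.slice_from _ hF2]
        have h : (F.2 + 1).toNat = F.2.toNat + 1 := by omega
        simp [h]
      rw [pvGroups, if_pos hb, ← ih]
      simp only [group_by_trials_alt, ← hF]
      by_cases h : F.2 < (xs.length : Int)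
      · rw [if_pos (hcond.mpr h), if_pos h, htail]; simp
      · rw [if_neg (fun hh => h (hcond.mp hh)), if_neg h]; simp
    · -- head is not a marker: b joins the first group
      have hm : marksOf (b :: xs) = (marksOf xs).map (· + 1) := by
        rw [marksOf_cons, if_neg hb]; rfl
      rw [pvGroups, if_neg hb, ← ih]
      cases hms : marksOf xs with
      | nil =>
        -- no markers anywhere: one single group (or none)
        simp only [group_by_trials_alt, hm, hms, List.map_nil, List.foldl_nil]
        have hcond : ((0 : Int) < ((b :: xs).length : Int)) := by
          simp only [List.length_cons]; push_cast; omega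
        rw [if_pos hcond, PySem.List.slice_from _ le_rfl]
        cases xs with
        | nil => simp
        | cons c cs =>
          have hlen : (0 : Int) < (((c :: cs).length : Int)) := by
            simp only [List.length_cons]; push_cast; omega
          rw [if_pos hlen, PySem.List.slice_from _ le_rfl]
          simp
      | cons i rest =>
        have hi : 0 ≤ i := hnn i (by rw [hms]; exact List.mem_cons_self ..)
        have hrest : ∀ j ∈ rest, 0 ≤ j := fun j hj => hnn j (by rw [hms]; exact List.mem_cons_of_mem _ hj)
        have hhead : PySem.List.slice (b :: xs) (some ((0 : Int))) (some (i + 1 + 1)) =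
            b :: PySem.List.slice xs (some (0 : Int)) (some (i + 1)) := by
          rw [PySem.List.slice_toNat _ (by omega) (by omega),
            PySem.List.slice_toNat _ (by omega) (by omega)]
          have h1 : (i + 1 + 1).toNat = (i + 1).toNat + 1 := by omega
          simp [h1]
        simp only [group_by_trials_alt, hm, hms, List.map_cons, List.foldl_cons, stepB,
          List.nil_append, hhead]
        rw [B_acc (b :: xs), B_shift b xs rest hrest (i + 1) (by omega)]
        set H := rest.foldl (stepB xs) ([], i + 1) with hH
        have hH2 : 0 ≤ H.2 := B_snd_nonneg xs rest hrest (i + 1) (by omega)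
        have hcond : (H.2 + 1 < ((b :: xs).length : Int)) ↔ (H.2 < (xs.length : Int)) := by
          simp only [List.length_cons]; push_cast; omega
        have htail : PySem.List.slice (b :: xs) (some (H.2 + 1)) = PySem.List.slice xs (some H.2) := by
          rw [PySem.List.slice_from _ (by omega), PySem.List.slice_from _ hH2]
          have h : (H.2 + 1).toNat = H.2.toNat + 1 := by omega
          simp [h]
        rw [B_acc xs rest, ← hH]
        by_cases h : H.2 < (xs.length : Int)
        · rw [if_pos (hcond.mpr h), if_pos h, htail]; simp
        · rw [if_neg (fun hh => h (hcond.mp hh)), if_neg h]; simp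

-- ===== VERDICT (by name: the statement is the Claim_ definition above) =====
theorem group_by_trials_spec : Claim_equal_group_by_trials := by
  intro xs _ _
  unfold Spec_group_by_trials
  rw [A_eq_pvGroups, B_eq_pvGroups]
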